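-- pv_equiv track=rewrite | github.com/jano31415/codejam | codeforces/788_round_div2/probb.py | solve
-- ===== SOURCE A (Python) =====
-- def solve(n, s, forbidden):
--     forbidden = set(forbidden)
--     indexes = [0]
--     for i, x in enumerate(s):
--         if x in forbidden:
--             indexes.append(i)
--     if len(indexes)==1:
--         return 0
--     maxi = max(indexes)
--     diff_index = []
--     for i in range(len(indexes)-1):
--         diff_index.append(indexes[i+1] - indexes[i])
--     return max(diff_index)
-- ===== SOURCE B (Python) =====
-- def solve(n, s, forbidden):
--     fb = set(forbidden)
--     last = 0
--     best = 0
--     for i, x in enumerate(s):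
--         if x in fb:
--             best = max(best, i - last)
--             last = i
--     return best
-- ===== Notes on version B (the rewrite author's own statement) =====
-- stated objective: simpler
-- what changed: Replaces A's two materialized lists (positions list with a 0 sentinel, then a list of adjacent differences, each fed to max) by one single-pass scan keeping only a running last position and running maximum gap.
import Mathlib
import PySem

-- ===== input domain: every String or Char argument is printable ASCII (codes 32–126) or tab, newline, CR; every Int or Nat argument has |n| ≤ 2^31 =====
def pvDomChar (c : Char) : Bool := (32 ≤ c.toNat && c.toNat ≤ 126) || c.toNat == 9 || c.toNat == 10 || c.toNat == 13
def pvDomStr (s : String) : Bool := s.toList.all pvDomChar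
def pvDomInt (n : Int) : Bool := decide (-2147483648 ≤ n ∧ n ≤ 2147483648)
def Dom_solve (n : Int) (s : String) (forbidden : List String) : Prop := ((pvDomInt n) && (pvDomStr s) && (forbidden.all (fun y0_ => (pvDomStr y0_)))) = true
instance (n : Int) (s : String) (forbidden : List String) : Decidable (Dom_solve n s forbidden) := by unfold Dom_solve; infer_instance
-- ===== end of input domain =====

-- B replaces A's two list-building passes (positions with a 0 sentinel, then adjacent differences, each fed to max)
-- by one single-pass scan with a running last position and running maximum gap; equivalent, simpler (O(1) extra space).

-- ===== PORT A =====
def solve (n : Int) (s : String) (forbidden : List String) : Int :=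
  let fset : PySem.Set String := PySem.Set.ofList forbidden
  let indexes : List Int :=
    (PySem.List.enumerate s.toList).foldl
      (fun acc p => if PySem.Set.contains fset (String.mk [p.2]) then acc ++ [p.1] else acc) [0]
  if indexes.length == 1 then 0
  else
    let _maxi := (PySem.List.max? indexes (fun x => x)).getD 0
    let diff_index : List Int :=
      (PySem.List.pyRange 0 ((indexes.length : Int) - 1) 1).foldl
        (fun acc i => acc ++ [PySem.List.pyGetD indexes (i + 1) 0 - PySem.List.pyGetD indexes i 0]) []
    (PySem.List.max? diff_index (fun x => x)).getD 0

-- ===== PORT B =====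
def solve_alt (n : Int) (s : String) (forbidden : List String) : Int :=
  let fb : PySem.Set String := PySem.Set.ofList forbidden
  let r : Int × Int :=
    (PySem.List.enumerate s.toList).foldl
      (fun st p => if PySem.Set.contains fb (String.mk [p.2]) then (p.1, max st.2 (p.1 - st.1)) else st)
      (0, 0)
  r.2

-- ===== PRECONDITION & SPEC =====
def Spec_solve (n : Int) (s : String) (forbidden : List String) (out : Int) : Prop := out = solve_alt n s forbidden
instance (n : Int) (s : String) (forbidden : List String) (out : Int) : Decidable (Spec_solve n s forbidden out) := by unfold Spec_solve; infer_instance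

-- ===== CLAIM (what is proved, stated in full; the proofs are below) =====
def Claim_equal_solve : Prop := ∀ (n : Int) (s : String) (forbidden : List String), Dom_solve n s forbidden → Spec_solve n s forbidden (solve n s forbidden)

-- ===== LEMMAS AND PROOFS =====

/-- Adjacent differences of the list `a :: l`. -/
def pvD (a : Int) : List Int → List Int
  | [] => []
  | x :: t => (x - a) :: pvD x t

theorem pv_diff_eq_pvD (l : List Int) (a : Int) :
    (List.range l.length).map
      (fun k => (a :: l).getD (k + 1) 0 - (a :: l).getD k 0) = pvD a l := by
  induction l generalizing a with
  | nil => rfl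
  | cons x t ih =>
    simp only [List.length_cons, List.range_succ_eq_map, List.map_cons, List.map_map]
    simp only [pvD, List.cons.injEq]
    refine ⟨by simp, ?_⟩
    rw [← ih x]
    apply List.map_congr_left
    intro k _
    simp [Function.comp]

theorem pv_bridge (P : List Int) (a b : Int) :
    (P.foldl (fun st i => (i, max st.2 (i - st.1))) (a, b)).2 = (pvD a P).foldl max b := by
  induction P generalizing a b with
  | nil => rfl
  | cons x t ih => simp [pvD, List.foldl_cons, ih]

theorem pv_A_eq (P : List Int) (hPos : ∀ x ∈ P, 0 ≤ x) :
    (if ((((0 : Int) :: P).length == 1) = true) then (0 : Int)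
     else (PySem.List.max?
        ((PySem.List.pyRange 0 (((((0 : Int) :: P).length : Int)) - 1) 1).foldl
          (fun acc i => acc ++ [PySem.List.pyGetD ((0 : Int) :: P) (i + 1) 0
                              - PySem.List.pyGetD ((0 : Int) :: P) i 0]) [])
        (fun x => x)).getD 0)
    = (P.foldl (fun st i => (i, max st.2 (i - st.1))) ((0, 0) : Int × Int)).2 := by
  cases P with
  | nil => simp
  | cons x t =>
    have hx0 : 0 ≤ x := hPos x (by simp)
    have hlen : (((0 : Int) :: x :: t).length == 1) = false := by simp
    simp only [hlen, Bool.false_eq_true, if_false]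
    rw [PySem.List.foldl_append_singleton_eq_map
      (fun i => PySem.List.pyGetD ((0 : Int) :: x :: t) (i + 1) 0
              - PySem.List.pyGetD ((0 : Int) :: x :: t) i 0)]
    have hrange : PySem.List.pyRange 0 (((((0 : Int) :: x :: t).length : Int)) - 1) 1
        = (List.range (x :: t).length).map (fun k : Nat => (k : Int)) := by
      rw [PySem.List.pyRange_one]
      simp
    rw [hrange, List.map_map]
    have hmapeq : ((List.range (x :: t).length).map
        ((fun i => PySem.List.pyGetD ((0 : Int) :: x :: t) (i + 1) 0
                 - PySem.List.pyGetD ((0 : Int) :: x :: t) i 0) ∘ (fun k : Nat => (k : Int))))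
        = (List.range (x :: t).length).map
          (fun k => ((0 : Int) :: x :: t).getD (k + 1) 0 - ((0 : Int) :: x :: t).getD k 0) := by
      apply List.map_congr_left
      intro k _
      simp only [Function.comp]
      have h1 : ((k : Int) + 1) = ((k + 1 : Nat) : Int) := by push_cast; ring
      rw [h1, PySem.List.pyGetD_natCast, PySem.List.pyGetD_natCast]
    rw [List.nil_append, hmapeq, pv_diff_eq_pvD (x :: t) 0, pv_bridge (x :: t) 0 0]
    simp only [pvD]
    rw [PySem.List.max?_id_cons]
    simp only [Option.getD_some, List.foldl_cons]
    have hm : max (0 : Int) (x - 0) = x - 0 := by omega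
    rw [hm]

theorem solve_spec_aux (n : Int) (s : String) (forbidden : List String) :
    solve n s forbidden = solve_alt n s forbidden := by
  unfold solve solve_alt
  simp only [PySem.List.foldl_append_if]
  have hB : ∀ (q : Int × Char → Bool),
      ((PySem.List.enumerate s.toList).foldl
        (fun st p => if q p then (p.1, max st.2 (p.1 - st.1)) else st) ((0, 0) : Int × Int)).2
      = ((((PySem.List.enumerate s.toList).filter q).map (·.1)).foldl
          (fun st i => (i, max st.2 (i - st.1))) ((0, 0) : Int × Int)).2 := by
    intro q
    rw [List.foldl_map, List.foldl_filter]
  rw [hB]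
  have hPos : ∀ x ∈ (((PySem.List.enumerate s.toList).filter
      (fun p => PySem.Set.contains (PySem.Set.ofList forbidden) (String.mk [p.2]))).map (·.1)), 0 ≤ x := by
    intro x hx
    obtain ⟨p, hp, rfl⟩ := List.mem_map.mp hx
    have hp' := List.mem_of_mem_filter hp
    obtain ⟨k, hk, rfl⟩ := (PySem.List.mem_enumerate_iff _ _ _).mp hp'
    simp
  have := pv_A_eq _ hPos
  simpa using this

-- ===== VERDICT (by name: the statement is the Claim_ definition above) =====
theorem solve_spec : Claim_equal_solve := by
  intro n s forbidden _
  unfold Spec_solve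
  exact solve_spec_aux n s forbidden
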